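-- pv_equiv track=rewrite | github.com/nannasvei/ikea_50 | app.py | dp_optimal_groups
-- ===== SOURCE A (Python) =====
-- from functools import lru_cache
--
-- def dp_optimal_groups(nums, limit):
--     n = len(nums)
--     if n == 0:
--         return []
--
--     def subset_sum(mask):
--         return sum(nums[i] for i in range(n) if (mask >> i) & 1)
--
--     subsets = [m for m in range(1, 1 << n) if subset_sum(m) >= limit]
--
--     @lru_cache(None)
--     def solve(mask):
--         best = 0
--         for s in subsets:
--             if (mask & s) == s:
--                 best = max(best, 1 + solve(mask ^ s))
--         return best
--
--     groups = []
--     mask = (1 << n) - 1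
--     while mask:
--         chosen = None
--         for s in subsets:
--             if (mask & s) == s and solve(mask) == 1 + solve(mask ^ s):
--                 chosen = s
--                 break
--         if chosen is None:
--             break
--         group = [nums[i] for i in range(n) if (chosen >> i) & 1]
--         groups.append(group)
--         mask ^= chosen
--
--     return groups
-- ===== SOURCE B (Python) =====
-- from functools import lru_cache
--
-- def dp_optimal_groups(nums, limit):
--     n = len(nums)
--     if n == 0:
--         return []
--
--     def subs(m):
--         # ascending list of (submask, subset-sum) pairs of m, split on m's highest set bit
--         if m == 0:
--             return [(0, 0)]
--         j = m.bit_length() - 1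
--         rest = subs(m ^ (1 << j))
--         return rest + [(s + (1 << j), t + nums[j]) for (s, t) in rest]
--
--     @lru_cache(None)
--     def best(mask):
--         b = 0
--         for s, t in subs(mask):
--             if s and t >= limit:
--                 b = max(b, 1 + best(mask ^ s))
--         return b
--
--     groups = []
--     mask = (1 << n) - 1
--     while mask:
--         chosen = None
--         for s, t in subs(mask):
--             if s and t >= limit and best(mask) == 1 + best(mask ^ s):
--                 chosen = s
--                 break
--         if chosen is None:
--             break
--         groups.append([nums[i] for i in range(n) if (chosen >> i) & 1])
--         mask ^= chosen
--
--     return groups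
-- ===== Notes on version B (the rewrite author's own statement) =====
-- stated objective: alternative
-- what changed: Per-mask submask enumeration (recursive split on the highest bit, carrying subset sums incrementally) replaces A's global precomputed subset list that is rescanned in full at every memoized DP state.
import Mathlib
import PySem

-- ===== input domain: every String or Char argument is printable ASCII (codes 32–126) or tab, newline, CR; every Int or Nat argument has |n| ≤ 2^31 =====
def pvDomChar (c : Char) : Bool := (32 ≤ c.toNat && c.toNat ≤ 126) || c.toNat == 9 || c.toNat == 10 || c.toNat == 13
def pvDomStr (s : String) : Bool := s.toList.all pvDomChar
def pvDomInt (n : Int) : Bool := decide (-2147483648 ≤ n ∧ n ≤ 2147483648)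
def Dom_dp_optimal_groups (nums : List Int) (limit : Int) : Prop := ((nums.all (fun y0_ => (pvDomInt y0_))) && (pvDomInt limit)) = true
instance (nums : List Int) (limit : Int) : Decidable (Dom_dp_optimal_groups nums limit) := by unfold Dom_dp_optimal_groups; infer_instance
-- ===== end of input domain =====

-- B replaces A's global subset list (rescanned in full at every memoized DP state) by a per-mask
-- submask enumeration that carries subset sums incrementally: a different enumeration strategy.

-- ===== PORT A =====
-- sum(nums[i] for i in range(n) if (mask >> i) & 1)
def pySubsetSum (nums : List Int) (n : Nat) (mask : Nat) : Int :=
  (List.range n).foldl (fun acc i => if (mask >>> i) &&& 1 == 1 then acc + nums.getD i 0 else acc) 0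

-- subsets = [m for m in range(1, 1 << n) if subset_sum(m) >= limit]
def pySubsets (nums : List Int) (limit : Int) (n : Nat) : List Nat :=
  (List.range' 1 (2 ^ n - 1)).filter (fun m => limit ≤ pySubsetSum nums n m)

-- the `for s in subsets` loop of solve; the recursive call is guarded by the
-- totality test `mask ^^^ s < mask` (always true when it is reached: s ≠ 0 and s ⊆ mask)
def solveGo (subsets : List Nat) (mask : Nat) (rem : List Nat) (best : Nat) : Nat :=
  match rem with
  | [] => best
  | s :: rest =>
    if mask &&& s == s then
      if _h : mask ^^^ s < mask then
        solveGo subsets mask rest (max best (1 + solveGo subsets (mask ^^^ s) subsets 0))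
      else solveGo subsets mask rest best
    else solveGo subsets mask rest best
termination_by (mask, rem.length)

def solveA (subsets : List Nat) (mask : Nat) : Nat := solveGo subsets mask subsets 0

-- [nums[i] for i in range(n) if (s >> i) & 1]   (the same comprehension appears in A and B)
def groupOf (nums : List Int) (n : Nat) (s : Nat) : List Int :=
  ((List.range n).filter (fun i => (s >>> i) &&& 1 == 1)).map (fun i => nums.getD i 0)

-- the `while mask:` loop of A; the first-match scan with break is find?
def loopA (nums : List Int) (n : Nat) (subsets : List Nat) (mask : Nat) (groups : List (List Int)) : List (List Int) :=
  if mask == 0 then groups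
  else
    match subsets.find? (fun s => (mask &&& s == s) && (solveA subsets mask == 1 + solveA subsets (mask ^^^ s))) with
    | none => groups
    | some s =>
      if _h : mask ^^^ s < mask then
        loopA nums n subsets (mask ^^^ s) (groups ++ [groupOf nums n s])
      else groups ++ [groupOf nums n s]
termination_by mask

def dp_optimal_groups (nums : List Int) (limit : Int) : List (List Int) :=
  let n := nums.length
  if n == 0 then []
  else loopA nums n (pySubsets nums limit n) (2 ^ n - 1) []

-- ===== PORT B =====
-- clearing the top bit of m decreases it (termination of subsB)
theorem pv_xor_log2_lt (m : Nat) (h : m ≠ 0) : m ^^^ 2 ^ m.log2 < m := by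
  refine Nat.lt_of_testBit m.log2 ?_ (Nat.testBit_log2 h) ?_
  · simp [Nat.testBit_xor, Nat.testBit_log2 h, Nat.testBit_two_pow_self]
  · intro j hj
    rw [Nat.testBit_xor, Nat.testBit_two_pow_of_ne (Nat.ne_of_lt hj)]
    simp

-- def subs(m): ascending list of (submask, subset-sum) pairs, split on m's highest set bit
-- (m.bit_length() - 1 = Nat.log2 m for m ≠ 0)
def subsB (nums : List Int) (m : Nat) : List (Nat × Int) :=
  if h : m = 0 then [(0, 0)]
  else
    let j := m.log2
    let rest := subsB nums (m ^^^ 2 ^ j)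
    rest ++ rest.map (fun st => (st.1 + 2 ^ j, st.2 + nums.getD j 0))
termination_by m
decreasing_by exact pv_xor_log2_lt m h

-- the `for s, t in subs(mask)` loop of best, with the memoized recursion inlined;
-- same totality guard as in A's port
def bestGo (nums : List Int) (limit : Int) (mask : Nat) (rem : List (Nat × Int)) (b : Nat) : Nat :=
  match rem with
  | [] => b
  | (s, t) :: rest =>
    if (s != 0) && decide (limit ≤ t) then
      if _h : mask ^^^ s < mask then
        bestGo nums limit mask rest (max b (1 + bestGo nums limit (mask ^^^ s) (subsB nums (mask ^^^ s)) 0))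
      else bestGo nums limit mask rest b
    else bestGo nums limit mask rest b
termination_by (mask, rem.length)

def bestB (nums : List Int) (limit : Int) (mask : Nat) : Nat :=
  bestGo nums limit mask (subsB nums mask) 0

-- the `while mask:` loop of B
def loopB (nums : List Int) (limit : Int) (n : Nat) (mask : Nat) (groups : List (List Int)) : List (List Int) :=
  if mask == 0 then groups
  else
    match (subsB nums mask).find? (fun st =>
        (st.1 != 0) && decide (limit ≤ st.2) && (bestB nums limit mask == 1 + bestB nums limit (mask ^^^ st.1))) with
    | none => groups
    | some st =>
      if _h : mask ^^^ st.1 < mask then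
        loopB nums limit n (mask ^^^ st.1) (groups ++ [groupOf nums n st.1])
      else groups ++ [groupOf nums n st.1]
termination_by mask

def dp_optimal_groups_alt (nums : List Int) (limit : Int) : List (List Int) :=
  let n := nums.length
  if n == 0 then []
  else loopB nums limit n (2 ^ n - 1) []

-- ===== PRECONDITION & SPEC =====
def Spec_dp_optimal_groups (nums : List Int) (limit : Int) (out : List (List Int)) : Prop := out = dp_optimal_groups_alt nums limit
instance (nums : List Int) (limit : Int) (out : List (List Int)) : Decidable (Spec_dp_optimal_groups nums limit out) := by unfold Spec_dp_optimal_groups; infer_instance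

-- ===== CLAIM (what is proved, stated in full; the proofs are below) =====
def Claim_equal_dp_optimal_groups : Prop := ∀ (nums : List Int) (limit : Int), Dom_dp_optimal_groups nums limit → Spec_dp_optimal_groups nums limit (dp_optimal_groups nums limit)

-- ===== LEMMAS AND PROOFS =====

-- `(m >> i) & 1` truthiness is testBit
theorem pv_tb (m i : Nat) : ((m >>> i) &&& 1 == 1) = m.testBit i := by
  rw [Nat.testBit, Nat.one_and_eq_mod_two, Nat.shiftRight_eq_div_pow]
  rcases Nat.mod_two_eq_zero_or_one (m >>> i) with h | h <;>
    rw [Nat.shiftRight_eq_div_pow] at h <;> simp [h]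

theorem pv_testBit_div (m i : Nat) : m.testBit i = decide (m / 2 ^ i % 2 = 1) := by
  rw [Nat.testBit, Nat.one_and_eq_mod_two, Nat.shiftRight_eq_div_pow]
  rcases Nat.mod_two_eq_zero_or_one (m / 2 ^ i) with h | h <;> simp [h]

theorem pv_sub_iff {s m : Nat} : s &&& m = s ↔ (∀ i, s.testBit i = true → m.testBit i = true) := by
  constructor
  · intro h i hi
    have h2 := congrArg (fun x => x.testBit i) h
    simp only [Nat.testBit_and, hi, Bool.true_and] at h2
    exact h2
  · intro h
    apply Nat.eq_of_testBit_eq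
    intro i
    rw [Nat.testBit_and]
    cases hs : s.testBit i
    · simp
    · simp [h i hs]

theorem pv_sub_le {s m : Nat} (h : s &&& m = s) : s ≤ m := h ▸ Nat.and_le_right

theorem pv_sub_trans {s m f : Nat} (h1 : s &&& m = s) (h2 : m &&& f = m) : s &&& f = s :=
  pv_sub_iff.mpr fun i hi => pv_sub_iff.mp h2 i (pv_sub_iff.mp h1 i hi)

theorem pv_xor_testBit {s m : Nat} (h : s &&& m = s) (i : Nat) :
    (m ^^^ s).testBit i = (m.testBit i && !(s.testBit i)) := by
  cases hs : s.testBit i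
  · simp [Nat.testBit_xor, hs]
  · simp [Nat.testBit_xor, hs, pv_sub_iff.mp h i hs]

theorem pv_xor_sub {s m : Nat} (h : s &&& m = s) : (m ^^^ s) &&& m = m ^^^ s :=
  pv_sub_iff.mpr fun i hi => by
    rw [pv_xor_testBit h] at hi
    exact (Bool.and_eq_true_iff.mp hi).1

theorem pv_xor_lt {s m : Nat} (hs : s ≠ 0) (h : s &&& m = s) : m ^^^ s < m := by
  have h1 : s.testBit s.log2 = true := Nat.testBit_log2 hs
  refine Nat.lt_of_testBit s.log2 ?_ (pv_sub_iff.mp h _ h1) ?_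
  · rw [pv_xor_testBit h, h1]; simp
  · intro j hj
    have hsj : s.testBit j = false :=
      Nat.testBit_eq_false_of_lt
        (lt_of_lt_of_le Nat.lt_log2_self (Nat.pow_le_pow_right (by norm_num) hj))
    rw [pv_xor_testBit h, hsj]
    simp

theorem pv_lt_pow_of_bits {x j : Nat} (h : ∀ i, j ≤ i → x.testBit i = false) : x < 2 ^ j := by
  by_contra hc
  obtain ⟨i, hi, ht⟩ := Nat.exists_ge_and_testBit_of_ge_two_pow (Nat.le_of_not_lt hc)
  rw [h i hi] at ht
  exact Bool.false_ne_true ht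

theorem pv_testBit_addpow {s j : Nat} (h : s < 2 ^ j) (i : Nat) :
    (s + 2 ^ j).testBit i = (if i = j then true else s.testBit i) := by
  rcases lt_trichotomy i j with hij | hij | hij
  · rw [if_neg (Nat.ne_of_lt hij), pv_testBit_div, pv_testBit_div]
    obtain ⟨k, rfl⟩ : ∃ k, j = i + k + 1 := ⟨j - i - 1, by omega⟩
    have hpw : (2:Nat) ^ (i + k + 1) = 2 ^ i * (2 * 2 ^ k) := by ring
    rw [hpw, Nat.add_mul_div_left _ _ (Nat.two_pow_pos i), Nat.add_mul_mod_self_left]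
  · subst hij
    rw [if_pos rfl, pv_testBit_div, Nat.add_div_right _ (Nat.two_pow_pos i),
        Nat.div_eq_of_lt h]
    simp
  · rw [if_neg (Nat.ne_of_gt hij)]
    have h2 : (2:Nat) ^ (j + 1) ≤ 2 ^ i := Nat.pow_le_pow_right (by norm_num) hij
    have h1 : s + 2 ^ j < 2 ^ i := by rw [pow_succ] at h2; omega
    rw [Nat.testBit_eq_false_of_lt h1, Nat.testBit_eq_false_of_lt (by omega)]

theorem pv_sum_eq (nums : List Int) (n mask : Nat) :
    pySubsetSum nums n mask = ∑ i ∈ Finset.range n, (if mask.testBit i then nums.getD i 0 else 0) := by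
  unfold pySubsetSum
  induction n with
  | zero => simp
  | succ k ih =>
    rw [List.range_succ, List.foldl_append, ih, Finset.sum_range_succ]
    simp only [List.foldl_cons, List.foldl_nil, pv_tb]
    split <;> simp

theorem pv_sum_zero (nums : List Int) (n : Nat) : pySubsetSum nums n 0 = 0 := by
  rw [pv_sum_eq]
  simp [Nat.zero_testBit]

theorem pv_sum_addpow (nums : List Int) {n j s : Nat} (hj : j < n) (hs : s < 2 ^ j) :
    pySubsetSum nums n (s + 2 ^ j) = pySubsetSum nums n s + nums.getD j 0 := by
  rw [pv_sum_eq, pv_sum_eq]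
  have hbj : s.testBit j = false := Nat.testBit_eq_false_of_lt hs
  have hupd : ∀ i, (if (s + 2 ^ j).testBit i then nums.getD i 0 else 0)
      = Function.update (fun i => if s.testBit i then nums.getD i 0 else 0) j (nums.getD j 0) i := by
    intro i
    rw [pv_testBit_addpow hs]
    by_cases h : i = j
    · subst h; simp
    · simp [Function.update, h]
  rw [Finset.sum_congr rfl fun i _ => hupd i,
      Finset.sum_update_of_mem (Finset.mem_range.mpr hj),
      ← Finset.add_sum_erase _ _ (Finset.mem_range.mpr hj), Finset.erase_eq]
  simp [hbj]
  ring

theorem pv_subsB_char (nums : List Int) : ∀ m : Nat, m &&& (2 ^ nums.length - 1) = m →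
    List.Pairwise (fun a b : Nat × Int => a.1 < b.1) (subsB nums m) ∧
    ∀ s t, ((s, t) ∈ subsB nums m ↔ (s &&& m = s ∧ t = pySubsetSum nums nums.length s)) := by
  intro m
  induction m using Nat.strong_induction_on with
  | _ m IH =>
    intro hm
    by_cases h0 : m = 0
    · subst h0
      have e : subsB nums 0 = [(0, 0)] := by rw [subsB]; norm_num
      rw [e]
      refine ⟨List.pairwise_singleton _ _, ?_⟩
      intro s t
      rw [List.mem_singleton]
      constructor
      · intro hmem
        have hs : s = 0 ∧ t = 0 := by simpa using hmem
        obtain ⟨rfl, rfl⟩ := hs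
        exact ⟨Nat.and_zero 0, (pv_sum_zero nums _).symm⟩
      · rintro ⟨h1, rfl⟩
        have hs0 : s = 0 := h1.symm.trans (Nat.and_zero s)
        subst hs0
        simp [pv_sum_zero]
    · have e : subsB nums m = subsB nums (m ^^^ 2 ^ m.log2)
          ++ (subsB nums (m ^^^ 2 ^ m.log2)).map
              (fun st => (st.1 + 2 ^ m.log2, st.2 + nums.getD m.log2 0)) := by
        rw [subsB]; rw [dif_neg h0]
      set j := m.log2 with hjdef
      set m' := m ^^^ 2 ^ j with hm'def
      have hjm : m.testBit j = true := Nat.testBit_log2 h0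
      have hpow : (2:Nat) ^ j &&& m = 2 ^ j := pv_sub_iff.mpr fun i hi => by
        rcases eq_or_ne i j with rfl | hne
        · exact hjm
        · rw [Nat.testBit_two_pow_of_ne (Ne.symm hne)] at hi; cases hi
      have hm'm : m' &&& m = m' := pv_xor_sub hpow
      have hm'full : m' &&& (2 ^ nums.length - 1) = m' := pv_sub_trans hm'm hm
      have hmhigh : ∀ i, j < i → m.testBit i = false := fun i hi =>
        Nat.testBit_eq_false_of_lt
          (lt_of_lt_of_le Nat.lt_log2_self (Nat.pow_le_pow_right (by norm_num) hi))
      have hm'bit : ∀ i, m'.testBit i = if i = j then false else m.testBit i := by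
        intro i
        rw [hm'def, pv_xor_testBit hpow]
        rcases eq_or_ne i j with rfl | hne
        · simp [Nat.testBit_two_pow_self]
        · rw [Nat.testBit_two_pow_of_ne (Ne.symm hne)]; simp [hne]
      have hm'lt : m' < 2 ^ j := pv_lt_pow_of_bits fun i hi => by
        rw [hm'bit]
        by_cases hij : i = j
        · simp [hij]
        · simp [hij, hmhigh i (by omega)]
      have hltm : m' < m := pv_xor_lt (Nat.two_pow_pos j).ne' hpow
      obtain ⟨IHp, IHmem⟩ := IH m' hltm hm'full
      have hjn : j < nums.length := by
        have h1 : 2 ^ j ≤ m := Nat.log2_self_le h0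
        have h2 : m ≤ 2 ^ nums.length - 1 := pv_sub_le hm
        have h3 : (0:Nat) < 2 ^ nums.length := Nat.two_pow_pos _
        exact (Nat.pow_lt_pow_iff_right (a := 2) (by norm_num)).mp (by omega)
      have hbound : ∀ st ∈ subsB nums m', st.1 < 2 ^ j := by
        intro st hst
        have hsub := ((IHmem st.1 st.2).mp (by simpa using hst)).1
        exact lt_of_le_of_lt (pv_sub_le hsub) hm'lt
      rw [e]
      constructor
      · rw [List.pairwise_append]
        refine ⟨IHp, List.pairwise_map.mpr (IHp.imp fun h => by omega), ?_⟩
        intro a ha b hb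
        obtain ⟨st, hst, rfl⟩ := List.mem_map.mp hb
        have h5 := hbound a ha
        show a.1 < st.1 + 2 ^ j
        omega
      · intro s t
        rw [List.mem_append, List.mem_map]
        constructor
        · rintro (hin | ⟨⟨s', t'⟩, hin, heq⟩)
          · obtain ⟨hsub, ht⟩ := (IHmem s t).mp hin
            exact ⟨pv_sub_trans hsub hm'm, ht⟩
          · obtain ⟨hsub', ht'⟩ := (IHmem s' t').mp hin
            have hs'lt : s' < 2 ^ j := lt_of_le_of_lt (pv_sub_le hsub') hm'lt
            obtain ⟨hs, hteq⟩ : s' + 2 ^ j = s ∧ t' + nums.getD j 0 = t := by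
              simpa using heq
            subst hs; subst hteq
            constructor
            · apply pv_sub_iff.mpr
              intro i hi
              rw [pv_testBit_addpow hs'lt] at hi
              by_cases hij : i = j
              · subst hij; exact hjm
              · rw [if_neg hij] at hi
                exact pv_sub_iff.mp (pv_sub_trans hsub' hm'm) i hi
            · rw [ht', pv_sum_addpow nums hjn hs'lt]
        · rintro ⟨hsub, ht⟩
          by_cases hb : s.testBit j = true
          · right
            have hpows : (2:Nat) ^ j &&& s = 2 ^ j := pv_sub_iff.mpr fun i' hi' => by
              rcases eq_or_ne i' j with rfl | hne
              · exact hb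
              · rw [Nat.testBit_two_pow_of_ne (Ne.symm hne)] at hi'; cases hi'
            have hs'sub : (s ^^^ 2 ^ j) &&& m' = s ^^^ 2 ^ j := by
              apply pv_sub_iff.mpr
              intro i hi
              rw [pv_xor_testBit hpows] at hi
              obtain ⟨h1, h2⟩ := Bool.and_eq_true_iff.mp hi
              have hij : i ≠ j := by
                rintro rfl
                rw [Nat.testBit_two_pow_self] at h2
                simp at h2
              rw [hm'bit, if_neg hij]
              exact pv_sub_iff.mp hsub i h1
            have hs'lt : s ^^^ 2 ^ j < 2 ^ j := lt_of_le_of_lt (pv_sub_le hs'sub) hm'lt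
            have hseq : (s ^^^ 2 ^ j) + 2 ^ j = s := by
              apply Nat.eq_of_testBit_eq
              intro i
              rw [pv_testBit_addpow hs'lt]
              by_cases hij : i = j
              · subst hij; simp [hb]
              · rw [if_neg hij, Nat.testBit_xor, Nat.testBit_two_pow_of_ne (Ne.symm hij)]
                simp
            refine ⟨(s ^^^ 2 ^ j, pySubsetSum nums nums.length (s ^^^ 2 ^ j)),
              (IHmem _ _).mpr ⟨hs'sub, rfl⟩, ?_⟩
            rw [Prod.mk.injEq]
            refine ⟨hseq, ?_⟩
            rw [ht]
            conv_rhs => rw [← hseq]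
            rw [pv_sum_addpow nums hjn hs'lt]
          · left
            apply (IHmem s t).mpr
            refine ⟨?_, ht⟩
            apply pv_sub_iff.mpr
            intro i hi
            have hij : i ≠ j := by rintro rfl; exact hb hi
            rw [hm'bit, if_neg hij]
            exact pv_sub_iff.mp hsub i hi

-- candidate lists coincide
theorem pv_cand_eq (nums : List Int) (limit : Int) (mask : Nat)
    (hm : mask &&& (2 ^ nums.length - 1) = mask) :
    (pySubsets nums limit nums.length).filter (fun s => mask &&& s == s)
      = ((subsB nums mask).filter (fun st => (st.1 != 0) && decide (limit ≤ st.2))).map Prod.fst := by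
  obtain ⟨hpair, hmem⟩ := pv_subsB_char nums mask hm
  have hpA : List.Pairwise (· < ·)
      ((pySubsets nums limit nums.length).filter (fun s => mask &&& s == s)) :=
    List.Pairwise.sublist List.filter_sublist
      (List.Pairwise.sublist List.filter_sublist (List.pairwise_lt_range' 1))
  have hpB : List.Pairwise (· < ·)
      (((subsB nums mask).filter (fun st => (st.1 != 0) && decide (limit ≤ st.2))).map Prod.fst) :=
    List.pairwise_map.mpr (List.Pairwise.sublist List.filter_sublist hpair)
  refine List.Perm.eq_of_pairwise (le := (· < ·)) (fun a b _ _ h1 h2 => by omega) hpA hpB ?_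
  rw [List.perm_ext_iff_of_nodup (hpA.imp Nat.ne_of_lt) (hpB.imp Nat.ne_of_lt)]
  intro a
  simp only [List.mem_filter, List.mem_map, pySubsets, List.mem_range'_1, decide_eq_true_eq,
    beq_iff_eq, Bool.and_eq_true, bne_iff_ne, ne_eq]
  constructor
  · rintro ⟨⟨⟨h1, h2⟩, h3⟩, h4⟩
    have h4' : a &&& mask = a := by rw [Nat.and_comm]; exact h4
    exact ⟨(a, pySubsetSum nums nums.length a),
      ⟨(hmem a _).mpr ⟨h4', rfl⟩, by omega, h3⟩, rfl⟩
  · rintro ⟨⟨a', t⟩, ⟨hin, hne, hle⟩, rfl⟩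
    obtain ⟨hsub, ht⟩ := (hmem a' t).mp hin
    have hlea : a' ≤ mask := pv_sub_le hsub
    have hleb : mask ≤ 2 ^ nums.length - 1 := pv_sub_le hm
    have hpos : (0:Nat) < 2 ^ nums.length := Nat.two_pow_pos _
    refine ⟨⟨⟨by omega, by omega⟩, ht ▸ hle⟩, ?_⟩
    rw [Nat.and_comm]
    exact hsub

theorem pv_solveGo_eq (subsets : List Nat) (mask : Nat) :
    ∀ (rem : List Nat) (b : Nat), (∀ s ∈ rem, s ≠ 0) →
    solveGo subsets mask rem b
      = (rem.filter (fun s => mask &&& s == s)).foldl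
          (fun acc s => max acc (1 + solveA subsets (mask ^^^ s))) b := by
  intro rem
  induction rem with
  | nil => intro b _; rw [solveGo]; simp
  | cons x rest ih =>
    intro b h
    have hx0 : x ≠ 0 := h x List.mem_cons_self
    rw [solveGo, List.filter_cons]
    by_cases hc : mask &&& x = x
    · have hcb : (mask &&& x == x) = true := by simp [hc]
      have hlt : mask ^^^ x < mask := pv_xor_lt hx0 (by rw [Nat.and_comm]; exact hc)
      rw [hcb]
      simp only [if_true, dif_pos hlt]
      rw [ih _ fun y hy => h y (List.mem_cons_of_mem x hy), List.foldl_cons]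
      rfl
    · have hcb : (mask &&& x == x) = false := by simp [hc]
      rw [hcb]
      simp only [Bool.false_eq_true, if_false]
      exact ih _ fun y hy => h y (List.mem_cons_of_mem x hy)

theorem pv_bestGo_eq (nums : List Int) (limit : Int) (mask : Nat) :
    ∀ (rem : List (Nat × Int)) (b : Nat), (∀ st ∈ rem, st.1 &&& mask = st.1) →
    bestGo nums limit mask rem b
      = (((rem.filter (fun st => (st.1 != 0) && decide (limit ≤ st.2))).map Prod.fst).foldl
          (fun acc s => max acc (1 + bestB nums limit (mask ^^^ s))) b) := by
  intro rem
  induction rem with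
  | nil => intro b _; rw [bestGo]; simp
  | cons x rest ih =>
    intro b h
    obtain ⟨xs, xt⟩ := x
    rw [bestGo, List.filter_cons]
    by_cases hc : ((xs != 0) && decide (limit ≤ xt)) = true
    · have hne : xs ≠ 0 := by simpa using (Bool.and_eq_true_iff.mp hc).1
      have hsub : xs &&& mask = xs := h (xs, xt) List.mem_cons_self
      have hlt : mask ^^^ xs < mask := pv_xor_lt hne hsub
      rw [hc]
      simp only [if_true, dif_pos hlt]
      rw [ih _ fun y hy => h y (List.mem_cons_of_mem _ hy), List.map_cons, List.foldl_cons]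
      rfl
    · have hcb : ((xs != 0) && decide (limit ≤ xt)) = false := by simpa using hc
      rw [hcb]
      simp only [Bool.false_eq_true, if_false]
      exact ih _ fun y hy => h y (List.mem_cons_of_mem _ hy)

theorem pv_find?_and_filter {α : Type} (p q : α → Bool) :
    ∀ l : List α, l.find? (fun x => p x && q x) = (l.filter p).find? q := by
  intro l
  induction l with
  | nil => rfl
  | cons x xs ih =>
    by_cases hp : p x
    · by_cases hq : q x
      · rw [List.find?_cons_of_pos (by simp [hp, hq]), List.filter_cons_of_pos hp,
            List.find?_cons_of_pos hq]
      · rw [List.find?_cons_of_neg (by simp [hq]), List.filter_cons_of_pos hp,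
            List.find?_cons_of_neg (by simp [hq]), ih]
    · rw [List.find?_cons_of_neg (by simp [hp]), List.filter_cons_of_neg (by simp [hp]), ih]

theorem pv_find?_congr {α : Type} (p q : α → Bool) :
    ∀ l : List α, (∀ x ∈ l, p x = q x) → l.find? p = l.find? q := by
  intro l
  induction l with
  | nil => intro _; rfl
  | cons x xs ih =>
    intro h
    have hx : p x = q x := h x (by simp)
    by_cases hp : p x
    · rw [List.find?_cons_of_pos hp, List.find?_cons_of_pos (hx ▸ hp)]
    · rw [List.find?_cons_of_neg (by simp [hp]), List.find?_cons_of_neg (by simp [← hx, hp]),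
          ih fun y hy => h y (by simp [hy])]

theorem pv_solve_eq_best (nums : List Int) (limit : Int) :
    ∀ mask : Nat, mask &&& (2 ^ nums.length - 1) = mask →
    solveA (pySubsets nums limit nums.length) mask = bestB nums limit mask := by
  intro mask
  induction mask using Nat.strong_induction_on with
  | _ mask IH =>
    intro hm
    obtain ⟨hpair, hmem⟩ := pv_subsB_char nums mask hm
    have hA : ∀ s ∈ pySubsets nums limit nums.length, s ≠ 0 := by
      intro s hs
      have h1 := (List.mem_filter.mp hs).1
      have h2 := List.mem_range'_1.mp h1
      omega
    have hB : ∀ st ∈ subsB nums mask, st.1 &&& mask = st.1 := by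
      intro st hst
      exact ((hmem st.1 st.2).mp (by simpa using hst)).1
    show solveGo (pySubsets nums limit nums.length) mask (pySubsets nums limit nums.length) 0
        = bestGo nums limit mask (subsB nums mask) 0
    rw [pv_solveGo_eq _ _ _ _ hA, pv_bestGo_eq _ _ _ _ _ hB, pv_cand_eq nums limit mask hm]
    apply PySem.List.foldl_congr_mem
    intro acc x hx
    obtain ⟨st, hst, rfl⟩ := List.mem_map.mp hx
    have hstsub : st ∈ subsB nums mask := List.mem_of_mem_filter hst
    have hne : st.1 ≠ 0 := by simpa using (Bool.and_eq_true_iff.mp (List.mem_filter.mp hst).2).1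
    have hsub : st.1 &&& mask = st.1 := hB st hstsub
    have hlt := pv_xor_lt hne hsub
    have hfull := pv_sub_trans (pv_xor_sub hsub) hm
    rw [IH _ hlt hfull]

theorem pv_loop_eq (nums : List Int) (limit : Int) :
    ∀ mask : Nat, mask &&& (2 ^ nums.length - 1) = mask → ∀ groups : List (List Int),
    loopA nums nums.length (pySubsets nums limit nums.length) mask groups
      = loopB nums limit nums.length mask groups := by
  intro mask
  induction mask using Nat.strong_induction_on with
  | _ mask IH =>
    intro hm groups
    rw [loopA, loopB]
    by_cases h0 : mask = 0
    · simp [h0]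
    · have h0b : (mask == 0) = false := by simp [h0]
      rw [h0b]
      simp only [Bool.false_eq_true, if_false]
      obtain ⟨hpair, hmem⟩ := pv_subsB_char nums mask hm
      have eA : (pySubsets nums limit nums.length).find?
            (fun s => (mask &&& s == s)
              && (solveA (pySubsets nums limit nums.length) mask
                    == 1 + solveA (pySubsets nums limit nums.length) (mask ^^^ s)))
          = (((subsB nums mask).filter (fun st => (st.1 != 0) && decide (limit ≤ st.2))).find?
              (fun st => bestB nums limit mask == 1 + bestB nums limit (mask ^^^ st.1))).map Prod.fst := by
        rw [pv_find?_and_filter, pv_cand_eq nums limit mask hm, List.find?_map]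
        apply congrArg (Option.map Prod.fst)
        apply pv_find?_congr
        intro st hst
        have hstsub : st ∈ subsB nums mask := List.mem_of_mem_filter hst
        have hne : st.1 ≠ 0 := by simpa using (Bool.and_eq_true_iff.mp (List.mem_filter.mp hst).2).1
        have hsub : st.1 &&& mask = st.1 := ((hmem st.1 st.2).mp (by simpa using hstsub)).1
        have hfull := pv_sub_trans (pv_xor_sub hsub) hm
        simp only [Function.comp]
        rw [pv_solve_eq_best nums limit mask hm, pv_solve_eq_best nums limit _ hfull]
      have eB : (subsB nums mask).find?
            (fun st => (st.1 != 0) && decide (limit ≤ st.2)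
              && (bestB nums limit mask == 1 + bestB nums limit (mask ^^^ st.1)))
          = ((subsB nums mask).filter (fun st => (st.1 != 0) && decide (limit ≤ st.2))).find?
              (fun st => bestB nums limit mask == 1 + bestB nums limit (mask ^^^ st.1)) :=
        pv_find?_and_filter _ _ _
      rw [eA, eB]
      cases hfind : ((subsB nums mask).filter (fun st => (st.1 != 0) && decide (limit ≤ st.2))).find?
          (fun st => bestB nums limit mask == 1 + bestB nums limit (mask ^^^ st.1)) with
      | none => rfl
      | some st =>
        simp only [Option.map_some]
        have hst := List.mem_of_find?_eq_some hfind
        have hstsub : st ∈ subsB nums mask := List.mem_of_mem_filter hst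
        have hne : st.1 ≠ 0 := by simpa using (Bool.and_eq_true_iff.mp (List.mem_filter.mp hst).2).1
        have hsub : st.1 &&& mask = st.1 := ((hmem st.1 st.2).mp (by simpa using hstsub)).1
        have hlt := pv_xor_lt hne hsub
        have hfull := pv_sub_trans (pv_xor_sub hsub) hm
        rw [dif_pos hlt, dif_pos hlt]
        exact IH _ hlt hfull _

-- ===== VERDICT (by name: the statement is the Claim_ definition above) =====
theorem dp_optimal_groups_spec : Claim_equal_dp_optimal_groups := by
  intro nums limit _
  unfold Spec_dp_optimal_groups dp_optimal_groups dp_optimal_groups_alt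
  simp only []
  by_cases h : nums.length == 0
  · simp [h]
  · simp only [h]
    exact pv_loop_eq nums limit (2 ^ nums.length - 1) (Nat.and_self _) []
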